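-- pv_equiv track=rewrite | github.com/manuelradec/mantenimiento_windows | core/security.py | _origin_allowed
-- ===== SOURCE A (Python) =====
-- def _host_matches_pattern(host_no_port: str, pattern: str) -> bool:
--     """
--     Return True if host_no_port matches a wildcard pattern.
--
--     Pattern '*.example.com' matches 'sub.example.com' and 'example.com'
--     but NOT 'other.com' or 'evilexample.com'.
--     """
--     if not pattern.startswith('*.'):
--         return False
--     suffix = pattern[1:]          # '*.example.com' → '.example.com'
--     base = suffix[1:]             # '.example.com'  → 'example.com'
--     return host_no_port == base or host_no_port.endswith(suffix)
--
-- def _origin_allowed(origin: str, allowed_origins: set, wildcard_patterns: list) -> bool: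
--     """
--     Return True if origin (scheme://host[:port]) is allowed.
--
--     Checks exact set membership first, then wildcard patterns using the
--     same _host_matches_pattern logic as Host header validation.
--     """
--     if origin in allowed_origins:
--         return True
--     try:
--         host_with_port = origin.split('://', 1)[1]
--         host_no_port = host_with_port.rsplit(':', 1)[0] if ':' in host_with_port else host_with_port
--     except IndexError:
--         return False
--     return any(_host_matches_pattern(host_no_port, p) for p in wildcard_patterns)
-- ===== SOURCE B (Python) =====
-- def _origin_allowed(origin: str, allowed_origins: set, wildcard_patterns: list) -> bool:
--     if origin in allowed_origins:
--         return True
--     parts = origin.split('://', 1)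
--     if len(parts) < 2:
--         return False
--     host_with_port = parts[1]
--     host = host_with_port.rsplit(':', 1)[0] if ':' in host_with_port else host_with_port
--     bases = {p[2:] for p in wildcard_patterns if p.startswith('*.')}
--     chain = {host} | {host[i + 1:] for i, c in enumerate(host) if c == '.'}
--     return not bases.isdisjoint(chain)
-- ===== Notes on version B (the rewrite author's own statement) =====
-- stated objective: alternative
-- what changed: Instead of testing every wildcard pattern against the host with a prefix/endswith check, B builds a set of base domains from the patterns once and walks the host's dot-suffix chain (the host plus each suffix after a '.'), returning True iff the chain intersects the base set.
import Mathlib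
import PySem

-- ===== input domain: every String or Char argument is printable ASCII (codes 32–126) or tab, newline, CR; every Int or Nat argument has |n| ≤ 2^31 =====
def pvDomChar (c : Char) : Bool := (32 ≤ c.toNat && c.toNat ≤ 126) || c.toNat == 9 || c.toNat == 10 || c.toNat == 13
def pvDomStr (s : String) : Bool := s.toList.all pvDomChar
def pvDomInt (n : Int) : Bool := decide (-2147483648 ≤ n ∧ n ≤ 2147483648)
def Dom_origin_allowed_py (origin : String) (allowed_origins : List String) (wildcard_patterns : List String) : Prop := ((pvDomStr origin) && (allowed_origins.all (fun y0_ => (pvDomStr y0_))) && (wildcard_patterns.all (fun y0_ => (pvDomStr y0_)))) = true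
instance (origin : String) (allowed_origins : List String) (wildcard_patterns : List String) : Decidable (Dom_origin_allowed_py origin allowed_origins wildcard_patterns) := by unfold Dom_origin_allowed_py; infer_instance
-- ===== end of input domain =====

-- B replaces the per-pattern endswith scan by a base-domain set intersected with the host's dot-suffix chain (alternative decomposition, same behaviour).

-- ===== PORT A =====
-- s.rsplit(':', 1)[0]: the prefix before the LAST ':' — exact whenever ':' occurs in cs (the only case both Pythons call it)
def pvRsplitColonHead (cs : List Char) : List Char :=
  cs.take (cs.length - 1 - cs.reverse.idxOf ':')

def pvHostMatchesPattern (host : List Char) (pattern : List Char) : Bool :=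
  if !(PySem.Chars.startswith pattern ['*', '.']) then false
  else
    let suffix := PySem.List.slice pattern (some 1) none
    let base := PySem.List.slice suffix (some 1) none
    host == base || PySem.Chars.endswith host suffix

def origin_allowed_py (origin : String) (allowed_origins : List String) (wildcard_patterns : List String) : Bool :=
  if allowed_origins.contains origin then true
  else
    match PySem.Chars.splitOnMax origin.toList "://".toList 1 with
    | _ :: host_with_port :: _ =>
        let host_no_port :=
          if PySem.Chars.isIn [':'] host_with_port then pvRsplitColonHead host_with_port
          else host_with_port
        wildcard_patterns.any (fun p => pvHostMatchesPattern host_no_port p.toList)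
    | _ => false   -- split gave a single piece: [1] raises IndexError → return False

-- ===== PORT B =====
-- host[i+1:] for every index i with host[i] == '.'
def pvDotSuffixes : List Char → List (List Char)
  | [] => []
  | c :: rest => (if c = '.' then [rest] else []) ++ pvDotSuffixes rest

def origin_allowed_py_alt (origin : String) (allowed_origins : List String) (wildcard_patterns : List String) : Bool :=
  if allowed_origins.contains origin then true
  else
    let parts := PySem.Chars.splitOnMax origin.toList "://".toList 1
    if parts.length < 2 then false
    else
      let host_with_port := parts.getD 1 []
      let host :=
        if PySem.Chars.isIn [':'] host_with_port then
          -- host_with_port.rsplit(':', 1)[0]: prefix before the last ':' (exact since ':' occurs here)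
          host_with_port.take (host_with_port.length - 1 - host_with_port.reverse.idxOf ':')
        else host_with_port
      let bases := PySem.Set.ofList (wildcard_patterns.filterMap (fun p =>
        if PySem.Chars.startswith p.toList ['*', '.'] then some (p.toList.drop 2) else none))
      let chain := PySem.Set.ofList (host :: pvDotSuffixes host)
      !(PySem.Set.isdisjoint bases chain)

-- ===== PRECONDITION & SPEC =====
def Spec_origin_allowed_py (origin : String) (allowed_origins : List String) (wildcard_patterns : List String) (out : Bool) : Prop := out = origin_allowed_py_alt origin allowed_origins wildcard_patterns
instance (origin : String) (allowed_origins : List String) (wildcard_patterns : List String) (out : Bool) : Decidable (Spec_origin_allowed_py origin allowed_origins wildcard_patterns out) := by unfold Spec_origin_allowed_py; infer_instance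

-- ===== CLAIM (what is proved, stated in full; the proofs are below) =====
def Claim_equal_origin_allowed_py : Prop := ∀ (origin : String) (allowed_origins : List String) (wildcard_patterns : List String), Dom_origin_allowed_py origin allowed_origins wildcard_patterns → Spec_origin_allowed_py origin allowed_origins wildcard_patterns (origin_allowed_py origin allowed_origins wildcard_patterns)

-- ===== LEMMAS AND PROOFS =====

theorem mem_pvDotSuffixes (cs b : List Char) : b ∈ pvDotSuffixes cs ↔ ('.' :: b) <:+ cs := by
  induction cs with
  | nil => simp [pvDotSuffixes]
  | cons c rest ih =>
      simp only [pvDotSuffixes, List.mem_append, List.suffix_cons_iff, ih]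
      by_cases hc : c = '.'
      · subst hc; simp
      · simp [hc]
        intro h; exact absurd h.symm hc

theorem pvHostMatchesPattern_iff (host p : List Char) :
    pvHostMatchesPattern host p = true ↔
      (PySem.Chars.startswith p ['*', '.'] = true ∧ p.drop 2 ∈ host :: pvDotSuffixes host) := by
  unfold pvHostMatchesPattern
  by_cases hs : PySem.Chars.startswith p ['*', '.'] = true
  · obtain ⟨rest, hrest⟩ := (PySem.Chars.startswith_iff p ['*', '.']).1 hs
    subst hrest
    have h2 : (['*', '.'] ++ rest : List Char) = '*' :: '.' :: rest := rfl
    rw [h2] at hs ⊢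
    simp only [hs, Bool.not_true, Bool.false_eq_true, if_false,
      PySem.List.slice_from_one, List.tail_cons, List.drop_succ_cons, List.drop_zero,
      Bool.or_eq_true, beq_iff_eq, List.mem_cons, PySem.Chars.endswith_iff, true_and]
    rw [← mem_pvDotSuffixes host rest]
    constructor
    · rintro (h | h)
      exacts [Or.inl h.symm, Or.inr h]
    · rintro (h | h)
      exacts [Or.inl h.symm, Or.inr h]
  · simp [hs]

theorem origin_allowed_wild_eq (host : List Char) (wild : List String) :
    wild.any (fun p => pvHostMatchesPattern host p.toList) =
      !(PySem.Set.isdisjoint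
          (PySem.Set.ofList (wild.filterMap (fun p =>
            if PySem.Chars.startswith p.toList ['*', '.'] then some (p.toList.drop 2) else none)))
          (PySem.Set.ofList (host :: pvDotSuffixes host))) := by
  rw [Bool.eq_iff_iff]
  simp only [PySem.Set.isdisjoint, Bool.not_not, List.any_eq_true,
    PySem.Set.contains, List.contains_iff_mem]
  constructor
  · rintro ⟨p, hp, hm⟩
    obtain ⟨hsw, hmem⟩ := (pvHostMatchesPattern_iff host p.toList).1 hm
    refine ⟨p.toList.drop 2, ?_, ?_⟩
    · rw [PySem.Set.mem_ofList]
      exact List.mem_filterMap.2 ⟨p, hp, by simp [hsw]⟩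
    · rw [PySem.Set.mem_ofList]; exact hmem
  · rintro ⟨x, hx, hc⟩
    rw [PySem.Set.mem_ofList] at hx hc
    obtain ⟨p, hp, hfp⟩ := List.mem_filterMap.1 hx
    by_cases hsw : PySem.Chars.startswith p.toList ['*', '.'] = true
    · rw [if_pos hsw, Option.some_inj] at hfp
      exact ⟨p, hp, (pvHostMatchesPattern_iff host p.toList).2 ⟨hsw, hfp ▸ hc⟩⟩
    · rw [if_neg hsw] at hfp; exact absurd hfp (by simp)

-- ===== VERDICT (by name: the statement is the Claim_ definition above) =====
theorem origin_allowed_py_spec : Claim_equal_origin_allowed_py := by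
  intro origin allowed wild _
  unfold Spec_origin_allowed_py origin_allowed_py origin_allowed_py_alt
  by_cases h1 : allowed.contains origin = true
  · rw [if_pos h1, if_pos h1]
  · rw [if_neg h1, if_neg h1]
    cases hsplit : PySem.Chars.splitOnMax origin.toList "://".toList 1 with
    | nil => rfl
    | cons a t =>
        cases t with
        | nil => rfl
        | cons b t' =>
            have h := origin_allowed_wild_eq
              (if PySem.Chars.isIn [':'] b then pvRsplitColonHead b else b) wild
            simpa [pvRsplitColonHead] using h
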